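-- pv_equiv track=rewrite | github.com/Ananta-dot/misr_new | save_every_round.py | motif_seeds
-- ===== SOURCE A (Python) =====
-- from typing import Dict, List, Tuple, Optional
--
-- Seq = List[int]
--
-- def motif_rainbow(n: int) -> Seq:
--     return list(range(1, n+1)) + list(range(n, 0, -1))
--
-- def motif_doubled(n: int) -> Seq:
--     return [x for i in range(1, n+1) for x in (i,i)]
--
-- def motif_interleave(n: int) -> Seq:
--     out=[]
--     for i in range(1, n+1, 2):
--         j = i+1 if i+1<=n else i
--         out += [i, j, i, j]
--     # ensure exactly two per label
--     cnt = {i:0 for i in range(1,n+1)}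
--     fixed=[]
--     for x in out:
--         if cnt[x] < 2:
--             fixed.append(x); cnt[x]+=1
--     for i in range(1,n+1):
--         while cnt[i] < 2:
--             fixed.append(i); cnt[i]+=1
--     return fixed[:2*n]
--
-- def motif_zipper(n: int) -> Seq:
--     out=[]
--     for i in range(1, (n//2)+1):
--         j = n - i + 1
--         out += [i, j, i, j]
--     if n % 2 == 1:
--         k = (n//2)+1
--         out += [k,k]
--     return out[:2*n]
--
-- def motif_ladder(n: int) -> Seq:
--     out=[]
--     a, b = 1, 2
--     while len(out) < 2*n:
--         out += [a, b if b<=n else a]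
--         a += 1
--         b += 1
--         if a > n: a = n
--         if b > n: b = n
--     # adjust to exactly two per label
--     cnt = {i:0 for i in range(1,n+1)}
--     fixed=[]
--     for x in out:
--         if cnt[x] < 2:
--             fixed.append(x); cnt[x]+=1
--     for i in range(1,n+1):
--         while cnt[i] < 2:
--             fixed.append(i); cnt[i]+=1
--     return fixed[:2*n]
--
-- def motif_seeds(n: int) -> List[Seq]:
--     S = [
--         motif_rainbow(n),
--         motif_doubled(n),
--         motif_interleave(n),
--         motif_zipper(n),
--         motif_ladder(n),
--         list(range(1, n+1)) + list(range(1, n+1)),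
--         [x for pair in zip(range(1,n+1), range(1,n+1)) for x in pair],  # 1,1,2,2,...
--     ]
--     out=[]
--     for s in S:
--         if len(s)==2*n and all(s.count(i)==2 for i in range(1,n+1)):
--             out.append(s)
--     return out
-- ===== SOURCE B (Python) =====
-- from typing import Dict, List, Tuple, Optional
--
-- Seq = List[int]
--
-- def motif_seeds(n: int) -> List[Seq]:
--     # Every one of the seven seed patterns is a permutation of the multiset
--     # {1,1,2,2,...,n,n} by construction, so each is built directly in closed
--     # form and all seven are returned; for n < 0 there are no seeds.
--     if n < 0:
--         return []
--     up = list(range(1, n + 1))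
--     doubled = [x for i in up for x in (i, i)]
--     inter = []
--     for i in range(1, n + 1, 2):
--         inter += [i, i + 1, i, i + 1] if i + 1 <= n else [i, i]
--     zipper = []
--     for i in range(1, n // 2 + 1):
--         zipper += [i, n - i + 1, i, n - i + 1]
--     if n % 2 == 1:
--         k = n // 2 + 1
--         zipper += [k, k]
--     ladder = ([1] + [x for i in range(2, n + 1) for x in (i, i)] + [1]) if n >= 1 else []
--     return [up + list(reversed(up)), doubled, inter, zipper, ladder, up + up, list(doubled)]
-- ===== Notes on version B (the rewrite author's own statement) =====
-- stated objective: faster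
-- what changed: A builds some candidates with count-dict fix-up loops and then filters all seven through a per-label count scan; B proves each of the seven patterns is a valid double-occurrence sequence by construction and emits all of them directly in closed form, with no counting dict, no fix-up pass and no validity filter.
import Mathlib
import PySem

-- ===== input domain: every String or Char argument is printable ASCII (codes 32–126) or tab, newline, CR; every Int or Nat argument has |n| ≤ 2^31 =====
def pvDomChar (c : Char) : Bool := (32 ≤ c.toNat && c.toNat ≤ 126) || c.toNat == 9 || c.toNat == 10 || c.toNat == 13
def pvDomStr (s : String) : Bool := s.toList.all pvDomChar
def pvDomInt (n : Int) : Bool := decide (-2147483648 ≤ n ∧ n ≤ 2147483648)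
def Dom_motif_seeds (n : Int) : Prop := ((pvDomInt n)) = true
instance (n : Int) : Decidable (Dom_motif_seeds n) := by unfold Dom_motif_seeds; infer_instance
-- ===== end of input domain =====

-- B drops A's count-dict fix-up passes and final per-label validity filter: all seven
-- seed patterns are permutations of {1,1,...,n,n} by construction, so B builds each
-- directly in closed form and returns all of them (none for n < 0).

-- ===== PORT A =====
def motif_rainbow (n : Int) : List Int :=
  PySem.List.pyRange 1 (n + 1) 1 ++ PySem.List.pyRange n 0 (-1)

def motif_doubled (n : Int) : List Int :=
  (PySem.List.pyRange 1 (n + 1) 1).flatMap (fun i => [i, i])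

-- 'while cnt[i] < 2: fixed.append(i); cnt[i]+=1' — cnt values start at 0 and only
-- grow, so the while runs at most twice; fuel 2 makes the recursion structural and is exact.
def padTwo (i : Int) : Nat → (List Int × PySem.Dict Int Int) → (List Int × PySem.Dict Int Int)
  | 0, st => st
  | fuel + 1, (fixed, cnt) =>
      if cnt.getD i 0 < 2 then padTwo i fuel (fixed ++ [i], cnt.modify i 0 (· + 1))
      else (fixed, cnt)

-- the 'adjust to exactly two per label' block duplicated verbatim in
-- motif_interleave and motif_ladder; cnt[x] is ported as getD x 0, exact here
-- because every x reaching the lookup is a key of cnt (labels 1..n).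
def fixTwoPerLabel (n : Int) (out : List Int) : List Int :=
  let cnt : PySem.Dict Int Int :=
    (PySem.List.pyRange 1 (n + 1) 1).foldl (fun d i => d.insert i 0) PySem.Dict.empty
  let st := out.foldl (fun (st : List Int × PySem.Dict Int Int) x =>
      if st.2.getD x 0 < 2 then (st.1 ++ [x], st.2.modify x 0 (· + 1)) else st) ([], cnt)
  let st := (PySem.List.pyRange 1 (n + 1) 1).foldl (fun st i => padTwo i 2 st) st
  st.1

def motif_interleave (n : Int) : List Int :=
  let out := (PySem.List.pyRange 1 (n + 1) 2).foldl (fun out i =>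
      let j := if i + 1 ≤ n then i + 1 else i
      out ++ [i, j, i, j]) []
  PySem.List.slice (fixTwoPerLabel n out) none (some (2 * n))

def motif_zipper (n : Int) : List Int :=
  let out := (PySem.List.pyRange 1 (PySem.Int.floordiv n 2 + 1) 1).foldl (fun out i =>
      let j := n - i + 1
      out ++ [i, j, i, j]) []
  let out := if PySem.Int.mod n 2 = 1 then out ++ [PySem.Int.floordiv n 2 + 1, PySem.Int.floordiv n 2 + 1] else out
  PySem.List.slice out none (some (2 * n))

-- the 'while len(out) < 2*n' loop of motif_ladder; each pass appends two elements
def ladderLoop (n : Int) (out : List Int) (a b : Int) : List Int :=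
  if (out.length : Int) < 2 * n then
    ladderLoop n (out ++ [a, if b ≤ n then b else a])
      (if a + 1 > n then n else a + 1) (if b + 1 > n then n else b + 1)
  else out
termination_by (2 * n - out.length).toNat
decreasing_by simp; omega

def motif_ladder (n : Int) : List Int :=
  let out := ladderLoop n [] 1 2
  PySem.List.slice (fixTwoPerLabel n out) none (some (2 * n))

def motifS (n : Int) : List (List Int) :=
  [motif_rainbow n, motif_doubled n, motif_interleave n, motif_zipper n, motif_ladder n,
   PySem.List.pyRange 1 (n + 1) 1 ++ PySem.List.pyRange 1 (n + 1) 1,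
   ((PySem.List.pyRange 1 (n + 1) 1).zip (PySem.List.pyRange 1 (n + 1) 1)).flatMap
     (fun p => [p.1, p.2])]

def motif_seeds (n : Int) : List (List Int) :=
  (motifS n).foldl (fun out s =>
    if ((s.length : Int) == 2 * n &&
        (PySem.List.pyRange 1 (n + 1) 1).all (fun i => PySem.List.count s i == 2)) then
      out ++ [s]
    else out) []

-- ===== PORT B =====
def motif_seeds_alt (n : Int) : List (List Int) :=
  if n < 0 then []
  else
    let up := PySem.List.pyRange 1 (n + 1) 1
    let doubled := up.flatMap (fun i => [i, i])
    let inter := (PySem.List.pyRange 1 (n + 1) 2).foldl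
      (fun acc i => acc ++ (if i + 1 ≤ n then [i, i + 1, i, i + 1] else [i, i])) []
    let zipcore := (PySem.List.pyRange 1 (PySem.Int.floordiv n 2 + 1) 1).foldl
      (fun acc i => acc ++ [i, n - i + 1, i, n - i + 1]) []
    let zipper := if PySem.Int.mod n 2 = 1 then
        zipcore ++ [PySem.Int.floordiv n 2 + 1, PySem.Int.floordiv n 2 + 1]
      else zipcore
    let ladder := if 1 ≤ n then
        [1] ++ (PySem.List.pyRange 2 (n + 1) 1).flatMap (fun i => [i, i]) ++ [1]
      else []
    [up ++ up.reverse, doubled, inter, zipper, ladder, up ++ up, doubled]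

-- ===== PRECONDITION & SPEC =====
def Spec_motif_seeds (n : Int) (out : List (List Int)) : Prop := out = motif_seeds_alt n
instance (n : Int) (out : List (List Int)) : Decidable (Spec_motif_seeds n out) := by unfold Spec_motif_seeds; infer_instance

-- ===== CLAIM (what is proved, stated in full; the proofs are below) =====
def Claim_equal_motif_seeds : Prop := ∀ (n : Int), Dom_motif_seeds n → Spec_motif_seeds n (motif_seeds n)

-- ===== LEMMAS AND PROOFS =====

-- the target multiset {1,1,...,n,n} in sorted order
def pvT (n : Int) : List Int := (PySem.List.pyRange 1 (n + 1) 1).flatMap (fun i => [i, i])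

-- generic counting tools ------------------------------------------------------

theorem pv_count_flatMap_double (l : List Int) (v : Int) :
    (l.flatMap (fun i => [i, i])).count v = 2 * l.count v := by
  induction l with
  | nil => simp
  | cons a t ih => simp [List.count_cons, ih]; split_ifs <;> omega

theorem pv_nodup_pyRange (a b : Int) : (PySem.List.pyRange a b).Nodup := by
  rw [PySem.List.pyRange_one]
  exact (List.nodup_range).map (fun x y h => by omega)

theorem pv_count_pyRange (a b v : Int) :
    (PySem.List.pyRange a b).count v = if a ≤ v ∧ v < b then 1 else 0 := by
  by_cases h : a ≤ v ∧ v < b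
  · rw [if_pos h]
    exact List.count_eq_one_of_mem (pv_nodup_pyRange a b) (PySem.List.mem_pyRange_one.mpr h)
  · rw [if_neg h]
    exact List.count_eq_zero.mpr (fun hm => h (PySem.List.mem_pyRange_one.mp hm))

theorem pvT_count (n v : Int) : (pvT n).count v = if 1 ≤ v ∧ v ≤ n then 2 else 0 := by
  rw [pvT, pv_count_flatMap_double, pv_count_pyRange]
  split_ifs <;> omega

theorem pv_len_pyRange (a b : Int) : ((PySem.List.pyRange a b).length : Int) = max (b - a) 0 := by
  rw [PySem.List.pyRange_one]; simp

theorem pv_len_flatMap_double (l : List Int) :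
    (l.flatMap (fun i => [i, i])).length = 2 * l.length := by
  induction l with
  | nil => rfl
  | cons a t ih => simp at ih ⊢; omega

theorem pvT_length (n : Int) (h : 0 ≤ n) : ((pvT n).length : Int) = 2 * n := by
  rw [pvT, pv_len_flatMap_double]
  have := pv_len_pyRange 1 (n + 1)
  push_cast
  omega

theorem pv_count_flatMap_zero (l : List Int) (g : Int → List Int) (v : Int)
    (h : ∀ i ∈ l, (g i).count v = 0) : (l.flatMap g).count v = 0 := by
  induction l with
  | nil => simp
  | cons a t ih =>
    simp only [List.flatMap_cons, List.count_append]
    rw [h a (by simp), ih (fun i hi => h i (by simp [hi]))]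

theorem pv_count_flatMap_single (l : List Int) (g : Int → List Int) (v i₀ : Int)
    (hn : l.Nodup) (hi : i₀ ∈ l) (h : ∀ i ∈ l, i ≠ i₀ → (g i).count v = 0) :
    (l.flatMap g).count v = (g i₀).count v := by
  induction l with
  | nil => simp at hi
  | cons a t ih =>
    rcases List.nodup_cons.mp hn with ⟨ha, ht⟩
    simp only [List.flatMap_cons, List.count_append]
    rcases List.mem_cons.mp hi with rfl | hmem
    · rw [pv_count_flatMap_zero t g v (fun i hi' => h i (by simp [hi']) (fun he => ha (he ▸ hi')))]
      omega
    · rw [h a (by simp) (fun he => ha (he ▸ hmem)), ih ht hmem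
        (fun i hi' hne => h i (by simp [hi']) hne)]
      omega

-- the validity test of A holds on any permutation of pvT n ---------------------

theorem pv_pred_true (n : Int) (hn : 0 ≤ n) (s : List Int) (hp : s.Perm (pvT n)) :
    ((s.length : Int) == 2 * n &&
      (PySem.List.pyRange 1 (n + 1) 1).all (fun i => PySem.List.count s i == 2)) = true := by
  have hlen : ((s.length : Int)) = 2 * n := by rw [hp.length_eq]; exact pvT_length n hn
  rw [Bool.and_eq_true, beq_iff_eq]
  refine ⟨by exact_mod_cast hlen, ?_⟩
  rw [List.all_eq_true]
  intro i hi
  rw [PySem.List.mem_pyRange_one] at hi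
  rw [beq_iff_eq, PySem.List.count_eq, hp.count_eq, pvT_count, if_pos (by omega)]

-- rainbow ---------------------------------------------------------------------

theorem pv_down_eq (m : Nat) :
    PySem.List.pyRange (m : Int) 0 (-1) = (PySem.List.pyRange 1 ((m : Int) + 1) 1).reverse := by
  induction m with
  | zero => simp only [Nat.cast_zero]; decide
  | succ m ih =>
    rw [PySem.List.pyRange_neg_one_cons (by push_cast; omega)]
    have h2 : ((m + 1 : Nat) : Int) - 1 = (m : Int) := by push_cast; ring
    rw [h2, ih]
    have h3 : ((m + 1 : Nat) : Int) + 1 = ((m : Int) + 1) + 1 := by push_cast; ring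
    rw [h3]
    conv_rhs => rw [PySem.List.pyRange_one_succ_right (show (1:Int) ≤ (m:Int) + 1 by omega)]
    rw [List.reverse_append]
    simp

theorem pv_perm_rainbow (n : Int) :
    (PySem.List.pyRange 1 (n + 1) 1 ++ (PySem.List.pyRange 1 (n + 1) 1).reverse).Perm (pvT n) := by
  refine List.perm_iff_count.mpr (fun v => ?_)
  rw [List.count_append, List.count_reverse, pvT_count, pv_count_pyRange]
  split_ifs <;> omega

theorem pv_perm_upup (n : Int) :
    (PySem.List.pyRange 1 (n + 1) 1 ++ PySem.List.pyRange 1 (n + 1) 1).Perm (pvT n) := by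
  refine List.perm_iff_count.mpr (fun v => ?_)
  rw [List.count_append, pvT_count, pv_count_pyRange]
  split_ifs <;> omega

-- the zip-comprehension candidate is motif_doubled ----------------------------

theorem pv_zip_self (l : List Int) :
    (l.zip l).flatMap (fun p => [p.1, p.2]) = l.flatMap (fun i => [i, i]) := by
  induction l with
  | nil => rfl
  | cons a t ih => simp [ih]

-- keep2: the first-two-occurrences pass of fixTwoPerLabel ----------------------

def keep2 : List Int → List Int → List Int
  | acc, [] => acc
  | acc, x :: xs => if acc.count x < 2 then keep2 (acc ++ [x]) xs else keep2 acc xs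

theorem keep2_append (xs ys acc : List Int) :
    keep2 acc (xs ++ ys) = keep2 (keep2 acc xs) ys := by
  induction xs generalizing acc with
  | nil => rfl
  | cons a t ih => simp only [List.cons_append, keep2]; split_ifs <;> exact ih _

theorem keep2_id (xs : List Int) : ∀ acc, (∀ v, (acc ++ xs).count v ≤ 2) → keep2 acc xs = acc ++ xs := by
  induction xs with
  | nil => intro acc _; simp [keep2]
  | cons a t ih =>
    intro acc h
    have ha : acc.count a < 2 := by
      have := h a
      simp [List.count_append] at this ⊢
      omega
    rw [keep2, if_pos ha, ih (acc ++ [a]) (by intro v; have := h v; simpa [List.count_append, List.count_cons] using this)]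
    simp

theorem keep2_count_le (xs : List Int) : ∀ acc, (∀ v, acc.count v ≤ 2) → ∀ v, (keep2 acc xs).count v ≤ 2 := by
  induction xs with
  | nil => intro acc h v; exact h v
  | cons a t ih =>
    intro acc h v
    rw [keep2]
    split_ifs with hc
    · refine ih _ (fun w => ?_) v
      by_cases hw : w = a
      · subst hw; simp [List.count_append]; omega
      · have := h w
        have h0 : List.count w [a] = 0 := List.count_eq_zero.mpr (by simp [hw])
        simp [List.count_append, h0]
        omega
    · exact ih _ h v

-- fixTwoPerLabel = pad after keep2 --------------------------------------------

def padF (n : Int) (f : List Int) : List Int :=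
  (PySem.List.pyRange 1 (n + 1) 1).foldl (fun f i => f ++ List.replicate (2 - f.count i) i) f

theorem pv_getD_empty (v : Int) : (PySem.Dict.empty : PySem.Dict Int Int).getD v 0 = 0 := rfl

theorem pv_init0 (l : List Int) : ∀ (d : PySem.Dict Int Int), (∀ v, d.getD v 0 = 0) →
    ∀ v, (l.foldl (fun d i => d.insert i 0) d).getD v 0 = 0 := by
  induction l with
  | nil => intro d h v; exact h v
  | cons a t ih =>
    intro d h v
    refine ih _ (fun w => ?_) v
    by_cases hw : w = a
    · subst hw; exact PySem.Dict.getD_insert_self d w 0 0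
    · rw [PySem.Dict.getD_insert_of_ne d 0 0 hw]; exact h w

theorem pv_fold_keep (xs : List Int) : ∀ (f : List Int) (c : PySem.Dict Int Int),
    (∀ v, c.getD v 0 = (f.count v : Int)) →
    (xs.foldl (fun (st : List Int × PySem.Dict Int Int) x =>
        if st.2.getD x 0 < 2 then (st.1 ++ [x], st.2.modify x 0 (· + 1)) else st) (f, c)).1
      = keep2 f xs ∧
    ∀ v, (xs.foldl (fun (st : List Int × PySem.Dict Int Int) x =>
        if st.2.getD x 0 < 2 then (st.1 ++ [x], st.2.modify x 0 (· + 1)) else st) (f, c)).2.getD v 0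
      = ((keep2 f xs).count v : Int) := by
  induction xs with
  | nil => intro f c h; exact ⟨rfl, h⟩
  | cons x t ih =>
    intro f c h
    simp only [List.foldl_cons, keep2]
    by_cases hc : f.count x < 2
    · rw [if_pos (by rw [h x]; exact_mod_cast hc), if_pos hc]
      exact ih (f ++ [x]) _ (fun v => by
        rw [PySem.Dict.getD_modify]
        by_cases hv : v = x
        · subst hv; rw [if_pos rfl, h v]; simp [List.count_append]
        · rw [if_neg hv, h v]
          have hx0 : List.count v [x] = 0 := List.count_eq_zero.mpr (by simp [hv])
          simp [List.count_append, hx0])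
    · rw [if_neg (by rw [h x]; exact_mod_cast hc), if_neg hc]
      exact ih f c h

theorem pv_pad_eq (i : Int) (f : List Int) (c : PySem.Dict Int Int)
    (h : ∀ v, c.getD v 0 = (f.count v : Int)) (hle : f.count i ≤ 2) :
    (padTwo i 2 (f, c)).1 = f ++ List.replicate (2 - f.count i) i ∧
    ∀ v, (padTwo i 2 (f, c)).2.getD v 0 = (((padTwo i 2 (f, c)).1).count v : Int) := by
  have hstep : ∀ (g : List Int) (d : PySem.Dict Int Int), (∀ v, d.getD v 0 = (g.count v : Int)) →
      ∀ v, (d.modify i 0 (· + 1)).getD v 0 = ((g ++ [i]).count v : Int) := by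
    intro g d hg v
    rw [PySem.Dict.getD_modify]
    by_cases hv : v = i
    · subst hv; rw [if_pos rfl, hg v]; simp [List.count_append]
    · rw [if_neg hv, hg v]
      have hx0 : List.count v [i] = 0 := List.count_eq_zero.mpr (by simp [hv])
      simp [List.count_append, hx0]
  have h0 : f.count i = 0 ∨ f.count i = 1 ∨ f.count i = 2 := by omega
  rcases h0 with h0 | h0 | h0
  · rw [padTwo, if_pos (by rw [h i, h0]; norm_num),
        padTwo, if_pos (by rw [hstep f c h i]; simp [List.count_append, h0]),
        padTwo]
    constructor
    · simp [h0, List.replicate_succ]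
    · intro v
      exact hstep _ _ (hstep f c h) v
  · rw [padTwo, if_pos (by rw [h i, h0]; norm_num),
        padTwo, if_neg (by rw [hstep f c h i]; simp [List.count_append, h0])]
    constructor
    · simp [h0, List.replicate_succ]
    · exact hstep f c h
  · rw [padTwo, if_neg (by rw [h i, h0]; norm_num)]
    exact ⟨by simp [h0], h⟩

theorem pv_pads (l : List Int) : ∀ (f : List Int) (c : PySem.Dict Int Int),
    (∀ v, c.getD v 0 = (f.count v : Int)) → (∀ v, f.count v ≤ 2) →
    (l.foldl (fun st i => padTwo i 2 st) (f, c)).1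
      = l.foldl (fun f i => f ++ List.replicate (2 - f.count i) i) f := by
  induction l with
  | nil => intro f c _ _; rfl
  | cons a t ih =>
    intro f c h hle
    simp only [List.foldl_cons]
    obtain ⟨h1, h2⟩ := pv_pad_eq a f c h (hle a)
    have hcnt : ∀ v, ((padTwo a 2 (f, c)).1).count v ≤ 2 := by
      intro v
      rw [h1]
      by_cases hv : v = a
      · subst hv
        have hr : List.count v (List.replicate (2 - f.count v) v) = 2 - f.count v := by simp
        rw [List.count_append, hr]
        have := hle v; omega
      · have hz : List.count v (List.replicate (2 - f.count a) a) = 0 := by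
          rw [List.count_replicate]
          simp [beq_iff_eq, Ne.symm hv]
        simp [List.count_append, hz]; exact hle v
    have hih := ih (padTwo a 2 (f, c)).1 (padTwo a 2 (f, c)).2 h2 hcnt
    rw [Prod.mk.eta] at hih
    rw [hih, h1]

theorem pv_fix_eq (n : Int) (out : List Int) : fixTwoPerLabel n out = padF n (keep2 [] out) := by
  have hdef : fixTwoPerLabel n out =
      ((PySem.List.pyRange 1 (n + 1) 1).foldl (fun st i => padTwo i 2 st)
        (out.foldl (fun (st : List Int × PySem.Dict Int Int) x =>
          if st.2.getD x 0 < 2 then (st.1 ++ [x], st.2.modify x 0 (· + 1)) else st)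
          ([], (PySem.List.pyRange 1 (n + 1) 1).foldl (fun d i => d.insert i 0) PySem.Dict.empty))).1 := rfl
  rw [hdef]
  have hinit : ∀ v, ((PySem.List.pyRange 1 (n + 1) 1).foldl (fun d i => d.insert i 0)
      PySem.Dict.empty).getD v 0 = (([] : List Int).count v : Int) := by
    intro v
    simp only [List.count_nil, Nat.cast_zero]
    exact pv_init0 _ _ pv_getD_empty v
  obtain ⟨h1, h2⟩ := pv_fold_keep out [] _ hinit
  set st := out.foldl (fun (st : List Int × PySem.Dict Int Int) x =>
      if st.2.getD x 0 < 2 then (st.1 ++ [x], st.2.modify x 0 (· + 1)) else st)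
      ([], (PySem.List.pyRange 1 (n + 1) 1).foldl (fun d i => d.insert i 0) PySem.Dict.empty) with hst
  have hinv2 : ∀ v, st.2.getD v 0 = ((st.1).count v : Int) := by
    intro v; rw [h1]; exact h2 v
  have hcnt : ∀ v, (st.1).count v ≤ 2 := by
    intro v; rw [h1]; exact keep2_count_le out [] (fun w => by simp) v
  have hps := pv_pads (PySem.List.pyRange 1 (n + 1) 1) st.1 st.2 hinv2 hcnt
  rw [Prod.mk.eta] at hps
  rw [hps, h1]
  rfl

theorem padF_congr_id (l : List Int) (f : List Int) (h : ∀ i ∈ l, f.count i = 2) :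
    l.foldl (fun f i => f ++ List.replicate (2 - f.count i) i) f = f := by
  induction l with
  | nil => rfl
  | cons a t ih =>
    simp only [List.foldl_cons, h a (by simp), Nat.sub_self, List.replicate_zero, List.append_nil]
    exact ih (fun i hi => h i (by simp [hi]))

theorem padF_id (n : Int) (f : List Int) (h : ∀ i ∈ PySem.List.pyRange 1 (n + 1) 1, f.count i = 2) :
    padF n f = f := padF_congr_id _ f h

-- a candidate that is already a permutation of pvT n passes fixTwoPerLabel and the slice unchanged
theorem pv_fix_perm (n : Int) (hn : 0 ≤ n) (out : List Int) (h : (keep2 [] out).Perm (pvT n)) :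
    PySem.List.slice (fixTwoPerLabel n out) none (some (2 * n)) = keep2 [] out := by
  have hfix : fixTwoPerLabel n out = keep2 [] out := by
    rw [pv_fix_eq, padF_id]
    intro i hi
    rw [PySem.List.mem_pyRange_one] at hi
    rw [h.count_eq, pvT_count, if_pos (by omega)]
  rw [hfix]
  have hlen : ((keep2 [] out).length : Int) = 2 * n := by rw [h.length_eq]; exact pvT_length n hn
  rw [PySem.List.slice_to _ (by omega), List.take_of_length_le (by omega)]

-- interleave ------------------------------------------------------------------

def oddsN (m : Nat) : List Int := (List.range ((m + 1) / 2)).map (fun (k : Nat) => (1 : Int) + 2 * (k : Int))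

theorem pv_odds_eq (m : Nat) : PySem.List.pyRange 1 ((m : Int) + 1) 2 = oddsN m := by
  rw [PySem.List.pyRange_of_pos 1 ((m : Int) + 1) (by norm_num)]
  have harg : (if (1 : Int) < (m : Int) + 1 then (((m : Int) + 1 - 1 + 2 - 1) / 2).toNat else 0)
      = (m + 1) / 2 := by
    rcases Nat.eq_zero_or_pos m with rfl | hm
    · simp
    · rw [if_pos (by omega)]
      omega
  rw [harg]
  rfl

theorem pv_count4 (a b v : Int) (h1 : v = a) (h2 : v ≠ b) : List.count v [a, b, a, b] = 2 := by
  subst h1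
  simp [Ne.symm h2]

theorem pv_count4' (a b v : Int) (h1 : v ≠ a) (h2 : v = b) : List.count v [a, b, a, b] = 2 := by
  subst h2
  simp [Ne.symm h1]

theorem pv_count4_0 (a b v : Int) (h1 : v ≠ a) (h2 : v ≠ b) : List.count v [a, b, a, b] = 0 := by
  simp [Ne.symm h1, Ne.symm h2]

theorem pv_count2 (a v : Int) (h : v = a) : List.count v [a, a] = 2 := by
  subst h; simp

theorem pv_count2_0 (a v : Int) (h : v ≠ a) : List.count v [a, a] = 0 := by
  simp [Ne.symm h]

theorem pv_nodup_oddsN (m : Nat) : (oddsN m).Nodup := by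
  unfold oddsN
  exact (List.nodup_range).map (fun x y h => by omega)

def interB (n : Int) : List Int :=
  (PySem.List.pyRange 1 (n + 1) 2).foldl
    (fun acc i => acc ++ (if i + 1 ≤ n then [i, i + 1, i, i + 1] else [i, i])) []

theorem interB_flatMap (n : Int) :
    interB n = (PySem.List.pyRange 1 (n + 1) 2).flatMap
      (fun i => if i + 1 ≤ n then [i, i + 1, i, i + 1] else [i, i]) := by
  unfold interB
  rw [PySem.List.foldl_append_eq_flatMap]
  rfl

theorem pv_mem_oddsN (m : Nat) (i : Int) : i ∈ oddsN m ↔ ∃ k : Nat, k < (m + 1) / 2 ∧ i = 1 + 2 * k := by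
  simp [oddsN, eq_comm]

theorem pv_perm_interB (m : Nat) : (interB (m : Int)).Perm (pvT (m : Int)) := by
  refine List.perm_iff_count.mpr (fun v => ?_)
  rw [interB_flatMap, pv_odds_eq, pvT_count]
  set g : Int → List Int := fun i => if i + 1 ≤ (m : Int) then [i, i + 1, i, i + 1] else [i, i] with hg
  by_cases hv : 1 ≤ v ∧ v ≤ (m : Int)
  · rw [if_pos hv]
    by_cases hpar : ∃ k : Nat, v = 1 + 2 * (k : Int)
    · -- v odd : the block at i₀ = v
      have hi₀ : v ∈ oddsN m := by
        obtain ⟨k, hk⟩ := hpar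
        exact (pv_mem_oddsN m v).mpr ⟨k, by omega, hk⟩
      rw [pv_count_flatMap_single (oddsN m) g v v (pv_nodup_oddsN m) hi₀ ?side]
      · rw [hg]
        by_cases hle : v + 1 ≤ (m : Int)
        · simp only [if_pos hle]
          exact pv_count4 v (v + 1) v rfl (by omega)
        · simp only [if_neg hle]
          exact pv_count2 v v rfl
      case side =>
        intro i hi hne
        obtain ⟨k, hk, hik⟩ := (pv_mem_oddsN m i).mp hi
        obtain ⟨k', hk'⟩ := hpar
        simp only [hg]
        split_ifs
        · exact pv_count4_0 i (i + 1) v (by omega) (by omega)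
        · exact pv_count2_0 i v (by omega)
    · -- v even : the block at i₀ = v - 1
      have hodd : ∃ k : Nat, v - 1 = 1 + 2 * (k : Int) := by
        rcases Int.even_or_odd v with ⟨t, ht⟩ | ⟨t, ht⟩
        · exact ⟨(t - 1).toNat, by omega⟩
        · exact absurd ⟨t.toNat, by omega⟩ hpar
      obtain ⟨k, hk⟩ := hodd
      have hi₀ : v - 1 ∈ oddsN m := (pv_mem_oddsN m (v - 1)).mpr ⟨k, by omega, hk⟩
      rw [pv_count_flatMap_single (oddsN m) g v (v - 1) (pv_nodup_oddsN m) hi₀ ?side]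
      · rw [hg]
        simp only [if_pos (show v - 1 + 1 ≤ (m : Int) by omega)]
        exact pv_count4' (v - 1) (v - 1 + 1) v (by omega) (by omega)
      case side =>
        intro i hi hne
        obtain ⟨k', hk', hik⟩ := (pv_mem_oddsN m i).mp hi
        simp only [hg]
        split_ifs
        · exact pv_count4_0 i (i + 1) v (by omega) (by omega)
        · exact pv_count2_0 i v (by omega)
  · rw [if_neg hv]
    refine pv_count_flatMap_zero _ g v (fun i hi => ?_)
    obtain ⟨k, hk, hik⟩ := (pv_mem_oddsN m i).mp hi
    have hkm : 2 * (k : Int) < (m : Int) := by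
      have : (k : Int) < ((m + 1) / 2 : Nat) := by exact_mod_cast hk
      omega
    simp only [hg]
    split_ifs
    · exact pv_count4_0 i (i + 1) v (by omega) (by omega)
    · exact pv_count2_0 i v (by omega)

-- A's interleave raw output and its collapse ----------------------------------

theorem pv_count_le_two (n : Int) (s : List Int) (hp : s.Perm (pvT n)) (v : Int) :
    s.count v ≤ 2 := by
  rw [hp.count_eq, pvT_count]
  split_ifs <;> omega

theorem keep2_drop2 (f : List Int) (x : Int) (h : 2 ≤ f.count x) : keep2 f [x, x] = f := by
  rw [keep2, if_neg (by omega), keep2, if_neg (by omega)]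
  rfl

theorem pv_interA_keep (m : Nat) :
    keep2 [] ((PySem.List.pyRange 1 ((m : Int) + 1) 2).flatMap
      (fun i => [i, if i + 1 ≤ (m : Int) then i + 1 else i, i,
                 if i + 1 ≤ (m : Int) then i + 1 else i])) = interB (m : Int) := by
  have hcle := pv_count_le_two (m : Int) _ (pv_perm_interB m)
  rw [pv_odds_eq]
  by_cases hpar : m % 2 = 0
  · have hraw : (oddsN m).flatMap
        (fun i => [i, if i + 1 ≤ (m : Int) then i + 1 else i, i,
                   if i + 1 ≤ (m : Int) then i + 1 else i]) = interB (m : Int) := by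
      rw [interB_flatMap, pv_odds_eq]
      refine List.flatMap_congr (fun i hi => ?_)
      obtain ⟨k, hk, hik⟩ := (pv_mem_oddsN m i).mp hi
      have hkm : 2 * (k : Int) < (m : Int) := by
        have : (k : Int) < ((m + 1) / 2 : Nat) := by exact_mod_cast hk
        omega
      have hle : i + 1 ≤ (m : Int) := by omega
      rw [if_pos hle, if_pos hle]
    rw [hraw]
    exact keep2_id _ [] (fun v => by rw [List.nil_append]; exact hcle v)
  · -- m odd : the last block [m,m,m,m] collapses to [m,m]
    have hm1 : 1 ≤ m := by omega
    have hsplit : oddsN m = (List.range ((m - 1) / 2)).map (fun (k : Nat) => (1 : Int) + 2 * (k : Int))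
        ++ [(m : Int)] := by
      unfold oddsN
      have h2 : (m + 1) / 2 = (m - 1) / 2 + 1 := by omega
      rw [h2, List.range_succ, List.map_append, List.map_singleton]
      have h3 : (1 : Int) + 2 * (((m - 1) / 2 : Nat) : Int) = (m : Int) := by push_cast; omega
      rw [h3]
    have hfront : ∀ i ∈ (List.range ((m - 1) / 2)).map (fun (k : Nat) => (1 : Int) + 2 * (k : Int)),
        i + 1 ≤ (m : Int) := by
      intro i hi
      simp only [List.mem_map, List.mem_range] at hi
      obtain ⟨k, hk, hik⟩ := hi
      have : (k : Int) < (((m - 1) / 2 : Nat) : Int) := by exact_mod_cast hk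
      omega
    have hB : interB (m : Int) =
        ((List.range ((m - 1) / 2)).map (fun (k : Nat) => (1 : Int) + 2 * (k : Int))).flatMap
          (fun i => [i, i + 1, i, i + 1]) ++ [(m : Int), (m : Int)] := by
      rw [interB_flatMap, pv_odds_eq, hsplit, List.flatMap_append]
      congr 1
      · exact List.flatMap_congr (fun i hi => by rw [if_pos (hfront i hi)])
      · simp only [List.flatMap_cons, List.flatMap_nil, List.append_nil]
        rw [if_neg (by omega)]
    rw [hsplit, List.flatMap_append]
    have hlast : ([(m : Int)]).flatMap
        (fun i => [i, if i + 1 ≤ (m : Int) then i + 1 else i, i,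
                   if i + 1 ≤ (m : Int) then i + 1 else i]) = [(m : Int), (m : Int), (m : Int), (m : Int)] := by
      simp only [List.flatMap_cons, List.flatMap_nil, List.append_nil]
      rw [if_neg (by omega)]
    rw [hlast]
    have hfrontB : (List.flatMap
        (fun i => [i, if i + 1 ≤ (m : Int) then i + 1 else i, i,
                   if i + 1 ≤ (m : Int) then i + 1 else i])
        ((List.range ((m - 1) / 2)).map (fun (k : Nat) => (1 : Int) + 2 * (k : Int)))) =
        ((List.range ((m - 1) / 2)).map (fun (k : Nat) => (1 : Int) + 2 * (k : Int))).flatMap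
          (fun i => [i, i + 1, i, i + 1]) := by
      refine List.flatMap_congr (fun i hi => ?_)
      rw [if_pos (hfront i hi)]
    rw [hfrontB]
    have hassoc : ((List.range ((m - 1) / 2)).map (fun (k : Nat) => (1 : Int) + 2 * (k : Int))).flatMap
          (fun i => [i, i + 1, i, i + 1]) ++ [(m : Int), (m : Int), (m : Int), (m : Int)]
        = interB (m : Int) ++ [(m : Int), (m : Int)] := by
      rw [hB, List.append_assoc]
      rfl
    rw [hassoc, keep2_append]
    rw [keep2_id _ [] (fun v => by rw [List.nil_append]; exact hcle v)]
    rw [List.nil_append]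
    exact keep2_drop2 _ _ (by
      rw [(pv_perm_interB m).count_eq, pvT_count, if_pos (by omega)])

theorem pv_interA_eq (m : Nat) : motif_interleave (m : Int) = interB (m : Int) := by
  have hdef : motif_interleave (m : Int) =
      PySem.List.slice (fixTwoPerLabel (m : Int)
        ((PySem.List.pyRange 1 ((m : Int) + 1) 2).foldl (fun out i =>
          out ++ [i, if i + 1 ≤ (m : Int) then i + 1 else i, i,
                  if i + 1 ≤ (m : Int) then i + 1 else i]) []))
        none (some (2 * (m : Int))) := rfl
  rw [hdef, PySem.List.foldl_append_eq_flatMap, List.nil_append]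
  rw [pv_fix_perm (m : Int) (by positivity) _ (pv_interA_keep m ▸ pv_perm_interB m)]
  exact pv_interA_keep m

-- zipper ----------------------------------------------------------------------

def zipCore (n : Int) : List Int :=
  (PySem.List.pyRange 1 (PySem.Int.floordiv n 2 + 1) 1).foldl
    (fun acc i => acc ++ [i, n - i + 1, i, n - i + 1]) []

def zipB (n : Int) : List Int :=
  if PySem.Int.mod n 2 = 1 then
    zipCore n ++ [PySem.Int.floordiv n 2 + 1, PySem.Int.floordiv n 2 + 1]
  else zipCore n

theorem pv_perm_zipB (n : Int) (h : 0 ≤ n) : (zipB n).Perm (pvT n) := by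
  have hq : PySem.Int.floordiv n 2 = n / 2 := PySem.Int.floordiv_eq_ediv_of_pos (by norm_num)
  have hm : PySem.Int.mod n 2 = n % 2 := PySem.Int.mod_eq_emod_of_pos (by norm_num)
  refine List.perm_iff_count.mpr (fun v => ?_)
  rw [pvT_count]
  unfold zipB zipCore
  rw [PySem.List.foldl_append_eq_flatMap, List.nil_append, hq, hm]
  have hnodup := pv_nodup_pyRange 1 (n / 2 + 1)
  by_cases hpar : n % 2 = 1
  · rw [if_pos hpar, List.count_append]
    by_cases hv1 : 1 ≤ v ∧ v ≤ n / 2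
    · rw [if_pos (by omega),
        pv_count_flatMap_single _ _ v v hnodup (PySem.List.mem_pyRange_one.mpr (by omega))
          (fun i hi hne => by
            rw [PySem.List.mem_pyRange_one] at hi
            exact pv_count4_0 i (n - i + 1) v (by omega) (by omega)),
        pv_count4 v (n - v + 1) v rfl (by omega), pv_count2_0 (n / 2 + 1) v (by omega)]
    · by_cases hv2 : v = n / 2 + 1
      · rw [if_pos (by omega),
          pv_count_flatMap_zero _ _ v (fun i hi => by
            rw [PySem.List.mem_pyRange_one] at hi
            exact pv_count4_0 i (n - i + 1) v (by omega) (by omega)),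
          pv_count2 (n / 2 + 1) v hv2]
      · by_cases hv3 : 1 ≤ v ∧ v ≤ n
        · rw [if_pos hv3,
            pv_count_flatMap_single _ _ v (n - v + 1) hnodup
              (PySem.List.mem_pyRange_one.mpr (by omega))
              (fun i hi hne => by
                rw [PySem.List.mem_pyRange_one] at hi
                exact pv_count4_0 i (n - i + 1) v (by omega) (by omega)),
            pv_count4' (n - v + 1) (n - (n - v + 1) + 1) v (by omega) (by omega),
            pv_count2_0 (n / 2 + 1) v (by omega)]
        · rw [if_neg hv3,
            pv_count_flatMap_zero _ _ v (fun i hi => by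
              rw [PySem.List.mem_pyRange_one] at hi
              exact pv_count4_0 i (n - i + 1) v (by omega) (by omega)),
            pv_count2_0 (n / 2 + 1) v (by omega)]
  · rw [if_neg hpar]
    by_cases hv1 : 1 ≤ v ∧ v ≤ n / 2
    · rw [if_pos (by omega),
        pv_count_flatMap_single _ _ v v hnodup (PySem.List.mem_pyRange_one.mpr (by omega))
          (fun i hi hne => by
            rw [PySem.List.mem_pyRange_one] at hi
            exact pv_count4_0 i (n - i + 1) v (by omega) (by omega)),
        pv_count4 v (n - v + 1) v rfl (by omega)]
    · by_cases hv3 : 1 ≤ v ∧ v ≤ n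
      · rw [if_pos hv3,
          pv_count_flatMap_single _ _ v (n - v + 1) hnodup
            (PySem.List.mem_pyRange_one.mpr (by omega))
            (fun i hi hne => by
              rw [PySem.List.mem_pyRange_one] at hi
              exact pv_count4_0 i (n - i + 1) v (by omega) (by omega)),
          pv_count4' (n - v + 1) (n - (n - v + 1) + 1) v (by omega) (by omega)]
      · rw [if_neg hv3,
          pv_count_flatMap_zero _ _ v (fun i hi => by
            rw [PySem.List.mem_pyRange_one] at hi
            exact pv_count4_0 i (n - i + 1) v (by omega) (by omega))]

theorem pv_zipA_eq (n : Int) (h : 0 ≤ n) : motif_zipper n = zipB n := by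
  have hdef : motif_zipper n = PySem.List.slice (zipB n) none (some (2 * n)) := rfl
  rw [hdef]
  have hlen : ((zipB n).length : Int) = 2 * n := by
    rw [(pv_perm_zipB n h).length_eq]; exact pvT_length n h
  rw [PySem.List.slice_to _ (by omega), List.take_of_length_le (by omega)]

-- ladder ----------------------------------------------------------------------

def ladB (n : Int) : List Int :=
  if 1 ≤ n then [1] ++ (PySem.List.pyRange 2 (n + 1) 1).flatMap (fun i => [i, i]) ++ [1] else []

theorem keep2_drop1 (f : List Int) (x : Int) (h : 2 ≤ f.count x) : keep2 f [x] = f := by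
  rw [keep2, if_neg (by omega)]
  rfl

theorem pv_count_one (v : Int) : List.count v [(1 : Int)] = if v = 1 then 1 else 0 := by
  split_ifs with hv
  · subst hv; simp
  · exact List.count_eq_zero.mpr (by simp [hv])

-- counts of the list [1] ++ [2,2,3,3,...,n,n]
theorem pv_countG (n v : Int) :
    (([1] ++ (PySem.List.pyRange 2 (n + 1) 1).flatMap (fun i => [i, i])).count v) =
      (if v = 1 then 1 else 0) + (if 2 ≤ v ∧ v < n + 1 then 2 else 0) := by
  rw [List.count_append, pv_count_flatMap_double, pv_count_pyRange, pv_count_one]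
  split_ifs <;> omega

theorem pv_perm_ladB (n : Int) (h : 0 ≤ n) : (ladB n).Perm (pvT n) := by
  by_cases hn1 : 1 ≤ n
  · refine List.perm_iff_count.mpr (fun v => ?_)
    unfold ladB
    rw [if_pos hn1, List.count_append, pv_countG, pv_count_one, pvT_count]
    split_ifs <;> omega
  · have hn0 : n = 0 := by omega
    subst hn0
    unfold ladB
    rw [if_neg (by norm_num)]
    have : pvT 0 = [] := by decide
    rw [this]

-- the main while-loop of motif_ladder, characterised for 2 ≤ n
theorem pv_ladder_loop (n : Int) : ∀ (d : Nat) (k : Int), k = n - 1 - d → 1 ≤ k →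
    ∀ out, (out.length : Int) = 2 * (k - 1) →
    ladderLoop n out k (k + 1) =
      out ++ (PySem.List.pyRange k n 1).flatMap (fun j => [j, j + 1]) ++ [n, n] := by
  intro d
  induction d with
  | zero =>
    intro k hk hk1 out hlen
    rw [ladderLoop, if_pos (by omega), if_pos (show k + 1 ≤ n by omega),
      if_neg (show ¬ k + 1 > n by omega), if_pos (show k + 1 + 1 > n by omega)]
    rw [ladderLoop, if_pos (by simp; omega), if_pos (show n ≤ n by omega),
      if_pos (show k + 1 + 1 > n by omega), if_pos (show n + 1 > n by omega)]
    rw [ladderLoop, if_neg (by simp; omega)]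
    have hr : PySem.List.pyRange k n 1 = [k] := by
      rw [PySem.List.pyRange_one_cons (show k < n by omega)]
      have : PySem.List.pyRange (k + 1) n 1 = [] := by
        rw [PySem.List.pyRange_one]
        have : (n - (k + 1)).toNat = 0 := by omega
        rw [this]
        rfl
      rw [this]
    rw [hr]
    have hkn : k + 1 = n := by omega
    rw [hkn]
    simp
    omega
  | succ d ih =>
    intro k hk hk1 out hlen
    rw [ladderLoop, if_pos (by omega), if_pos (show k + 1 ≤ n by omega),
      if_neg (show ¬ k + 1 > n by omega), if_neg (show ¬ k + 1 + 1 > n by omega)]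
    have h22 : k + 1 + 1 = (k + 1) + 1 := rfl
    rw [h22, ih (k + 1) (by push_cast at hk ⊢; omega) (by omega) (out ++ [k, k + 1])
      (by simp; omega)]
    rw [PySem.List.pyRange_one_cons (show k < n by omega)]
    simp

theorem pv_ladA_eq (n : Int) (h : 0 ≤ n) : motif_ladder n = ladB n := by
  have hdef : motif_ladder n =
      PySem.List.slice (fixTwoPerLabel n (ladderLoop n [] 1 2)) none (some (2 * n)) := rfl
  by_cases hn0 : n = 0
  · subst hn0
    have hl0 : ladderLoop 0 [] 1 2 = [] := by
      rw [ladderLoop, if_neg (by norm_num)]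
    rw [hdef, hl0]
    decide
  · by_cases hn1 : n = 1
    · subst hn1
      have hl1 : ladderLoop 1 [] 1 2 = [1, 1] := by
        rw [ladderLoop, if_pos (by norm_num), if_neg (by norm_num),
          if_pos (by norm_num), if_pos (by norm_num)]
        rw [ladderLoop, if_neg (by norm_num)]
        rfl
      rw [hdef, hl1]
      decide
    · have hn2 : 2 ≤ n := by omega
      have hloop : ladderLoop n [] 1 2 =
          (PySem.List.pyRange 1 n 1).flatMap (fun j => [j, j + 1]) ++ [n, n] := by
        have := pv_ladder_loop n (n - 2).toNat 1 (by omega) (by norm_num) [] (by simp)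
        norm_num at this
        exact this
      -- the identity F ++ [n] = [1] ++ [2,2,...,n,n]
      have hid : ∀ (d : Nat), (PySem.List.pyRange 1 ((2 : Int) + d) 1).flatMap (fun j => [j, j + 1])
          ++ [(2 : Int) + d] = [1] ++ (PySem.List.pyRange 2 ((2 : Int) + d + 1) 1).flatMap (fun i => [i, i]) := by
        intro d
        induction d with
        | zero => decide
        | succ d ihd =>
          have hc1 : ((2 : Int) + (d + 1 : Nat)) = ((2 : Int) + d) + 1 := by push_cast; ring
          rw [hc1,
            PySem.List.pyRange_one_succ_right (a := 1) (b := (2 : Int) + d) (by omega),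
            PySem.List.pyRange_one_succ_right (a := 2) (b := (2 : Int) + d + 1) (by omega)]
          rw [List.flatMap_append, List.flatMap_append]
          have h' := congrArg (fun l => l ++ [(2 : Int) + d + 1, 2 + d + 1]) ihd
          simp only [List.flatMap_cons, List.flatMap_nil, List.append_nil, List.append_assoc,
            List.cons_append, List.nil_append] at h' ⊢
          exact h'
      have hidn : (PySem.List.pyRange 1 n 1).flatMap (fun j => [j, j + 1]) ++ [n]
          = [1] ++ (PySem.List.pyRange 2 (n + 1) 1).flatMap (fun i => [i, i]) := by
        have := hid (n - 2).toNat
        have hc : (2 : Int) + ((n - 2).toNat : Int) = n := by omega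
        rw [hc] at this
        exact this
      set F := (PySem.List.pyRange 1 n 1).flatMap (fun j => [j, j + 1]) with hF
      set G := [1] ++ (PySem.List.pyRange 2 (n + 1) 1).flatMap (fun i => [i, i]) with hG
      have hkeep : keep2 [] (F ++ [n, n]) = G := by
        have hsp : F ++ [n, n] = (F ++ [n]) ++ [n] := by simp
        rw [hsp, keep2_append, hidn]
        rw [keep2_id _ [] (fun v => by
          rw [List.nil_append, hG, pv_countG]
          split_ifs <;> omega)]
        rw [List.nil_append]
        exact keep2_drop1 _ _ (by rw [hG, pv_countG, if_neg (by omega), if_pos (by omega)])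
      have hpad : padF n G = G ++ [1] := by
        unfold padF
        rw [PySem.List.pyRange_one_cons (show (1 : Int) < n + 1 by omega), List.foldl_cons]
        have hc1 : G.count 1 = 1 := by rw [hG, pv_countG, if_pos rfl, if_neg (by omega)]
        rw [hc1]
        have hrep : List.replicate (2 - 1) (1 : Int) = [1] := rfl
        rw [hrep]
        refine padF_congr_id _ _ (fun i hi => ?_)
        rw [PySem.List.mem_pyRange_one] at hi
        rw [List.count_append, hG, pv_countG, if_neg (by omega), if_pos (by omega),
          List.count_eq_zero.mpr (by simp; omega)]
      have hladB : G ++ [1] = ladB n := by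
        unfold ladB
        rw [if_pos (by omega), hG]
      rw [hdef, hloop, pv_fix_eq, hkeep, hpad, hladB]
      have hlen : ((ladB n).length : Int) = 2 * n := by
        rw [(pv_perm_ladB n h).length_eq]; exact pvT_length n h
      rw [PySem.List.slice_to _ (by omega), List.take_of_length_le (by omega)]

-- assembling the seven candidates ---------------------------------------------

theorem pv_motifS_eq (n : Int) (h : 0 ≤ n) :
    motifS n =
      [PySem.List.pyRange 1 (n + 1) 1 ++ (PySem.List.pyRange 1 (n + 1) 1).reverse,
       (PySem.List.pyRange 1 (n + 1) 1).flatMap (fun i => [i, i]),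
       interB n, zipB n, ladB n,
       PySem.List.pyRange 1 (n + 1) 1 ++ PySem.List.pyRange 1 (n + 1) 1,
       (PySem.List.pyRange 1 (n + 1) 1).flatMap (fun i => [i, i])] := by
  obtain ⟨m, rfl⟩ : ∃ m : Nat, n = (m : Int) := ⟨n.toNat, by omega⟩
  unfold motifS motif_rainbow motif_doubled
  rw [pv_down_eq m, pv_interA_eq m, pv_zipA_eq _ h, pv_ladA_eq _ h, pv_zip_self]

theorem pv_neg (n : Int) (h : n < 0) : motif_seeds n = [] := by
  unfold motif_seeds
  rw [PySem.List.foldl_append_if_eq_filter, List.nil_append, List.filter_eq_nil_iff.mpr]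
  intro s _ hc
  rw [Bool.and_eq_true, beq_iff_eq] at hc
  have h0 : (0 : Int) ≤ (s.length : Int) := Int.natCast_nonneg _
  omega

theorem pv_altB_eq (n : Int) (h : ¬ n < 0) :
    motif_seeds_alt n =
      [PySem.List.pyRange 1 (n + 1) 1 ++ (PySem.List.pyRange 1 (n + 1) 1).reverse,
       (PySem.List.pyRange 1 (n + 1) 1).flatMap (fun i => [i, i]),
       interB n, zipB n, ladB n,
       PySem.List.pyRange 1 (n + 1) 1 ++ PySem.List.pyRange 1 (n + 1) 1,
       (PySem.List.pyRange 1 (n + 1) 1).flatMap (fun i => [i, i])] := by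
  rw [motif_seeds_alt, if_neg h]
  rfl

-- ===== VERDICT (by name: the statement is the Claim_ definition above) =====
theorem motif_seeds_spec : Claim_equal_motif_seeds := by
  intro n _
  show motif_seeds n = motif_seeds_alt n
  by_cases h : n < 0
  · rw [pv_neg n h, motif_seeds_alt, if_pos h]
  · rw [Int.not_lt] at h
    rw [pv_altB_eq n (by omega)]
    unfold motif_seeds
    rw [PySem.List.foldl_append_if_eq_filter, List.nil_append, pv_motifS_eq n h,
      List.filter_eq_self.mpr]
    intro s hs
    simp only [List.mem_cons, List.not_mem_nil, or_false] at hs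
    have hm : ∃ m : Nat, n = (m : Int) := ⟨n.toNat, by omega⟩
    obtain ⟨m, rfl⟩ := hm
    rcases hs with rfl | rfl | rfl | rfl | rfl | rfl | rfl
    · exact pv_pred_true _ h _ (pv_perm_rainbow _)
    · exact pv_pred_true _ h _ (List.Perm.refl _)
    · exact pv_pred_true _ h _ (pv_perm_interB m)
    · exact pv_pred_true _ h _ (pv_perm_zipB _ h)
    · exact pv_pred_true _ h _ (pv_perm_ladB _ h)
    · exact pv_pred_true _ h _ (pv_perm_upup _)
    · exact pv_pred_true _ h _ (List.Perm.refl _)
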